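-- pv_equiv track=rewrite | github.com/FabioYanezRomero/From-Text-to-Graph-Leveraging-Graph-Neural-Networks-for-Enhanced-Explainability-in-NLP | src/Analytics/consistency/plots.py | order_graphs
-- ===== SOURCE A (Python) =====
-- from typing import Dict, Iterable, List, Optional, Sequence
--
-- GRAPH_ORDER = ["skipgrams", "window", "constituency", "syntactic", "tokens"]
--
-- def order_graphs(graphs: Iterable[str]) -> List[str]:
--     seen = set()
--     ordered: List[str] = []
--     for candidate in GRAPH_ORDER:
--         if candidate in graphs and candidate not in seen:
--             ordered.append(candidate)
--             seen.add(candidate)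
--     for graph in graphs:
--         if graph not in seen:
--             ordered.append(graph)
--             seen.add(graph)
--     return ordered
-- ===== SOURCE B (Python) =====
-- from typing import Iterable, List
--
-- GRAPH_ORDER = ["skipgrams", "window", "constituency", "syntactic", "tokens"]
--
-- def order_graphs(graphs: Iterable[str]) -> List[str]:
--     priority = {name: i for i, name in enumerate(GRAPH_ORDER)}
--     uniq = list(dict.fromkeys(graphs))
--     return sorted(uniq, key=lambda g: priority.get(g, len(GRAPH_ORDER)))
-- ===== Notes on version B (the rewrite author's own statement) =====
-- stated objective: idiomatic
-- what changed: B replaces A's two accumulator loops (scan GRAPH_ORDER with membership tests, then scan graphs with a seen-set) by a rank map built once, a first-appearance dedup via dict.fromkeys, and one stable sort keyed by that rank.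
import Mathlib
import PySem

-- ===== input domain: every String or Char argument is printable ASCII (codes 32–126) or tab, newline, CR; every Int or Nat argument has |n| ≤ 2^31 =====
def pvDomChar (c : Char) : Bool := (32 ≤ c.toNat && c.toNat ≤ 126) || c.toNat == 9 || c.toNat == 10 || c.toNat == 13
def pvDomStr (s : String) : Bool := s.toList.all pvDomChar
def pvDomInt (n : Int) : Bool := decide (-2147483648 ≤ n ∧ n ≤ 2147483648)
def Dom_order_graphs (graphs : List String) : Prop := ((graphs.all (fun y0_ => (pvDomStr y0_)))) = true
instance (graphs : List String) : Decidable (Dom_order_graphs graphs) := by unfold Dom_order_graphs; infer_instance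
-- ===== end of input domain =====

-- B replaces A's two accumulator loops by a rank map, a first-appearance dedup and one
-- stable sort keyed by that rank (idiomatic restructuring; same result).

def pvGraphOrder : List String := ["skipgrams", "window", "constituency", "syntactic", "tokens"]

-- ===== PORT A =====
def order_graphs (graphs : List String) : List String :=
  let st1 := pvGraphOrder.foldl (fun st candidate =>
    if graphs.contains candidate && !(PySem.Set.contains st.1 candidate) then
      (PySem.Set.add st.1 candidate, st.2 ++ [candidate])
    else st) ((PySem.Set.empty : PySem.Set String), ([] : List String))
  let st2 := graphs.foldl (fun st g =>
    if !(PySem.Set.contains st.1 g) then (PySem.Set.add st.1 g, st.2 ++ [g]) else st) st1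
  st2.2

-- ===== PORT B =====
def order_graphs_alt (graphs : List String) : List String :=
  let priority : PySem.Dict String Int :=
    (PySem.List.enumerate pvGraphOrder).foldl
      (fun d p => PySem.Dict.insert d p.2 p.1) (PySem.Dict.empty)
  let uniq := PySem.List.dedup graphs
  PySem.List.sorted uniq (fun g => PySem.Dict.getD priority g (pvGraphOrder.length : Int))

-- ===== PRECONDITION & SPEC =====
def Spec_order_graphs (graphs : List String) (out : List String) : Prop := out = order_graphs_alt graphs
instance (graphs : List String) (out : List String) : Decidable (Spec_order_graphs graphs out) := by unfold Spec_order_graphs; infer_instance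

-- ===== CLAIM (what is proved, stated in full; the proofs are below) =====
def Claim_equal_order_graphs : Prop := ∀ (graphs : List String), Dom_order_graphs graphs → Spec_order_graphs graphs (order_graphs graphs)

-- ===== LEMMAS AND PROOFS =====

-- generic list facts
lemma filter_absorb {α : Type} (p q : α → Bool) (h : ∀ x, p x = true → q x = true) :
    ∀ l : List α, (l.filter q).filter p = l.filter p := by
  intro l
  induction l with
  | nil => rfl
  | cons a t ih =>
    by_cases hq : q a = true
    · rw [List.filter_cons_of_pos hq, List.filter_cons, List.filter_cons, ih]
    · have hp : p a = false := by
        cases hpa : p a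
        · rfl
        · exact absurd (h a hpa) hq
      rw [List.filter_cons_of_neg (by simp [hq]), List.filter_cons_of_neg (by simp [hp]), ih]

lemma flatMap_congr_mem {α β : Type} (f g : α → List β) :
    ∀ l : List α, (∀ a ∈ l, f a = g a) → l.flatMap f = l.flatMap g := by
  intro l
  induction l with
  | nil => intro _; rfl
  | cons a t ih =>
    intro h
    rw [List.flatMap_cons, List.flatMap_cons, h a (by simp), ih (fun a' h' => h a' (by simp [h']))]

-- first-occurrence dedup, in structural-recursion form
def pvDedup : List String → List String
  | [] => []
  | a :: l => a :: (pvDedup l).filter (fun x => !(x == a))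

lemma pvDedup_mem (l : List String) (x : String) : x ∈ pvDedup l ↔ x ∈ l := by
  induction l with
  | nil => simp [pvDedup]
  | cons a t ih =>
    simp only [pvDedup, List.mem_cons, List.mem_filter, ih]
    by_cases hx : x = a <;> simp [hx]

lemma pvDedup_nodup (l : List String) : (pvDedup l).Nodup := by
  induction l with
  | nil => simp [pvDedup]
  | cons a t ih =>
    simp only [pvDedup, List.nodup_cons]
    exact ⟨by simp [List.mem_filter], ih.filter _⟩

-- the two filter-juggling steps shared by the seen-set loops
lemma filter_dedup_skip (s : List String) (a : String) (t : List String) (ha : a ∈ s) :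
    (pvDedup (a :: t)).filter (fun x => !(s.contains x))
    = (pvDedup t).filter (fun x => !(s.contains x)) := by
  show (a :: (pvDedup t).filter (fun x => !(x == a))).filter (fun x => !(s.contains x)) = _
  rw [List.filter_cons_of_neg (by simp [ha])]
  apply filter_absorb
  intro x hx
  simp only [Bool.not_eq_true', beq_eq_false_iff_ne]
  rintro rfl
  simp [ha] at hx

lemma filter_dedup_take (s : List String) (a : String) (t : List String) (ha : a ∉ s) :
    (pvDedup (a :: t)).filter (fun x => !(s.contains x))
    = a :: (pvDedup t).filter (fun x => !((s ++ [a]).contains x)) := by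
  show (a :: (pvDedup t).filter (fun x => !(x == a))).filter (fun x => !(s.contains x)) = _
  rw [List.filter_cons_of_pos (by simp [ha])]
  congr 1
  rw [List.filter_filter]
  apply List.filter_congr
  intro x _
  by_cases hx : x = a
  · subst hx; simp
  · simp [hx]

lemma foldl_add_eq (l : List String) : ∀ s : List String,
    l.foldl PySem.Set.add s = s ++ (pvDedup l).filter (fun x => !(s.contains x)) := by
  induction l with
  | nil => intro s; simp [pvDedup]
  | cons a t ih =>
    intro s
    by_cases ha : a ∈ s
    · have h1 : PySem.Set.add s a = s := by simp [PySem.Set.add, PySem.Set.contains, ha]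
      rw [List.foldl_cons, h1, ih s, filter_dedup_skip s a t ha]
    · have h1 : PySem.Set.add s a = s ++ [a] := by simp [PySem.Set.add, PySem.Set.contains, ha]
      rw [List.foldl_cons, h1, ih (s ++ [a]), filter_dedup_take s a t ha]
      simp

lemma dedup_eq_pvDedup (l : List String) : PySem.List.dedup l = pvDedup l := by
  have h := foldl_add_eq l []
  simp only [PySem.List.dedup, PySem.Set.ofList, PySem.Set.empty] at *
  rw [h, List.nil_append]
  apply List.filter_eq_self.mpr
  intro x _
  simp

-- ---- A side ----

lemma loop1_eq (graphs : List String) : ∀ (cands seen out : List String),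
    cands.Nodup → (∀ c ∈ cands, c ∉ seen) →
    cands.foldl (fun st candidate =>
      if graphs.contains candidate && !(PySem.Set.contains st.1 candidate) then
        (PySem.Set.add st.1 candidate, st.2 ++ [candidate])
      else st) (seen, out)
    = (seen ++ cands.filter (fun c => graphs.contains c),
       out ++ cands.filter (fun c => graphs.contains c)) := by
  intro cands
  induction cands with
  | nil => intro seen out _ _; simp
  | cons c t ih =>
    intro seen out hnd hdisj
    have hc : c ∉ seen := hdisj c (by simp)
    have hnd' : t.Nodup := (List.nodup_cons.mp hnd).2
    have hcmem : c ∉ t := (List.nodup_cons.mp hnd).1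
    by_cases hg : c ∈ graphs
    · have hstep :
        (if graphs.contains c && !(PySem.Set.contains (seen, out).1 c) then
          (PySem.Set.add (seen, out).1 c, (seen, out).2 ++ [c]) else (seen, out))
        = (seen ++ [c], out ++ [c]) := by
        simp [PySem.Set.contains, PySem.Set.add, hc, hg]
      rw [List.foldl_cons, hstep, ih (seen ++ [c]) (out ++ [c]) hnd' ?_]
      · simp [hg]
      · intro c' hc'
        have h2 : c' ≠ c := fun h => hcmem (h ▸ hc')
        simp [hdisj c' (by simp [hc']), h2]
    · have hstep :
        (if graphs.contains c && !(PySem.Set.contains (seen, out).1 c) then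
          (PySem.Set.add (seen, out).1 c, (seen, out).2 ++ [c]) else (seen, out))
        = (seen, out) := by
        simp [hg]
      rw [List.foldl_cons, hstep, ih seen out hnd' (fun c' hc' => hdisj c' (by simp [hc']))]
      simp [hg]

lemma loop2_eq (l : List String) : ∀ (seen out : List String),
    (l.foldl (fun st g =>
      if !(PySem.Set.contains st.1 g) then (PySem.Set.add st.1 g, st.2 ++ [g]) else st)
      (seen, out)).2
    = out ++ (pvDedup l).filter (fun g => !(seen.contains g)) := by
  induction l with
  | nil => intro seen out; simp [pvDedup]
  | cons a t ih =>
    intro seen out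
    by_cases ha : a ∈ seen
    · have hstep :
        (if !(PySem.Set.contains (seen, out).1 a) then
          (PySem.Set.add (seen, out).1 a, (seen, out).2 ++ [a]) else (seen, out)) = (seen, out) := by
        simp [PySem.Set.contains, ha]
      rw [List.foldl_cons, hstep, ih seen out, filter_dedup_skip seen a t ha]
    · have hstep :
        (if !(PySem.Set.contains (seen, out).1 a) then
          (PySem.Set.add (seen, out).1 a, (seen, out).2 ++ [a]) else (seen, out))
        = (seen ++ [a], out ++ [a]) := by
        simp [PySem.Set.contains, PySem.Set.add, ha]
      rw [List.foldl_cons, hstep, ih (seen ++ [a]) (out ++ [a]), filter_dedup_take seen a t ha]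
      simp

-- A's value in closed form
lemma order_graphs_eq (graphs : List String) :
    order_graphs graphs
    = pvGraphOrder.filter (fun c => graphs.contains c)
      ++ (pvDedup graphs).filter
          (fun g => !((pvGraphOrder.filter (fun c => graphs.contains c)).contains g)) := by
  unfold order_graphs
  rw [show ((PySem.Set.empty : PySem.Set String), ([] : List String))
      = (([] : List String), ([] : List String)) from rfl]
  rw [loop1_eq graphs pvGraphOrder [] [] (by decide) (by intro c _; simp)]
  rw [List.nil_append, loop2_eq graphs]

-- ---- B side ----

lemma insertBy_append (bf : String → String → Bool) (x : String) :
    ∀ (A B : List String), (∀ a ∈ A, bf x a = false) → (∀ b ∈ B, bf x b = true) →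
    PySem.List.insertBy bf x (A ++ B) = A ++ x :: B := by
  intro A
  induction A with
  | nil =>
    intro B _ hB
    cases B with
    | nil => rfl
    | cons b t => simp [PySem.List.insertBy, hB b (by simp)]
  | cons a t ih =>
    intro B hA hB
    simp only [List.cons_append, PySem.List.insertBy, hA a (by simp)]
    simp [ih B (fun a' h => hA a' (by simp [h])) hB]

-- a stable sort with Int keys drawn from {0, …, N-1} is the concatenation of the key groups
lemma sorted_groups (key : String → Int) (N : Nat) :
    ∀ (xs : List String), (∀ x ∈ xs, ∃ k : Nat, k < N ∧ key x = (k : Int)) →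
    PySem.List.sorted xs key
    = (List.range N).flatMap (fun (k : Nat) => xs.filter (fun x => key x == ((k : Int)))) := by
  intro xs
  induction xs using List.reverseRecOn with
  | nil => intro _; simp [PySem.List.sorted]
  | append_singleton xs x ih =>
    intro hbound
    obtain ⟨k, hkN, hkey⟩ := hbound x (by simp)
    rw [PySem.List.sorted_eq_foldl_insertBy, List.foldl_append,
        ← PySem.List.sorted_eq_foldl_insertBy, ih (fun y hy => hbound y (by simp [hy]))]
    simp only [List.foldl_cons, List.foldl_nil]
    have hsplit : N = (k + 1) + (N - (k + 1)) := by omega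
    have hrange : List.range N
        = List.range (k + 1) ++ List.map (fun j => (k + 1) + j) (List.range (N - (k + 1))) := by
      conv_lhs => rw [hsplit]
      exact List.range_add
    have hA : ∀ a ∈ (List.range (k + 1)).flatMap
        (fun (k' : Nat) => xs.filter (fun y => key y == ((k' : Int)))),
        (decide (key x < key a)) = false := by
      intro a ha
      simp only [List.mem_flatMap, List.mem_range, List.mem_filter, beq_iff_eq] at ha
      obtain ⟨k', hk', _, hkeya⟩ := ha
      simp only [decide_eq_false_iff_not, not_lt, hkeya, hkey]
      exact_mod_cast Nat.le_of_lt_succ hk'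
    have hB : ∀ b ∈ (List.map (fun j => (k + 1) + j) (List.range (N - (k + 1)))).flatMap
        (fun (k' : Nat) => xs.filter (fun y => key y == ((k' : Int)))),
        (decide (key x < key b)) = true := by
      intro b hb
      simp only [List.mem_flatMap, List.mem_map, List.mem_range, List.mem_filter, beq_iff_eq] at hb
      obtain ⟨k', ⟨j, _, hj⟩, _, hkeyb⟩ := hb
      simp only [decide_eq_true_eq, hkeyb, hkey, ← hj]
      push_cast; omega
    rw [hrange, List.flatMap_append, insertBy_append _ _ _ _ hA hB, List.flatMap_append]
    have hright : (List.map (fun j => (k + 1) + j) (List.range (N - (k + 1)))).flatMap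
          (fun (k' : Nat) => (xs ++ [x]).filter (fun y => key y == ((k' : Int))))
        = (List.map (fun j => (k + 1) + j) (List.range (N - (k + 1)))).flatMap
          (fun (k' : Nat) => xs.filter (fun y => key y == ((k' : Int)))) := by
      apply flatMap_congr_mem
      intro k' hk'
      simp only [List.mem_map, List.mem_range] at hk'
      obtain ⟨j, _, hj⟩ := hk'
      rw [List.filter_append]
      have : [x].filter (fun y => key y == ((k' : Int))) = [] := by
        have hne : ¬ ((k : Int) = (k : Int) + 1 + (j : Int)) := by omega
        simp [hkey, ← hj, hne]
      rw [this, List.append_nil]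
    have hleft : (List.range (k + 1)).flatMap
          (fun (k' : Nat) => (xs ++ [x]).filter (fun y => key y == ((k' : Int))))
        = (List.range (k + 1)).flatMap
          (fun (k' : Nat) => xs.filter (fun y => key y == ((k' : Int)))) ++ [x] := by
      rw [List.range_succ, List.flatMap_append, List.flatMap_append]
      have h1 : (List.range k).flatMap
            (fun (k' : Nat) => (xs ++ [x]).filter (fun y => key y == ((k' : Int))))
          = (List.range k).flatMap
            (fun (k' : Nat) => xs.filter (fun y => key y == ((k' : Int)))) := by
        apply flatMap_congr_mem
        intro k' hk'
        simp only [List.mem_range] at hk'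
        rw [List.filter_append]
        have hfx : [x].filter (fun y => key y == ((k' : Int))) = [] := by
          have hne : ¬ ((k : Int) = ((k' : Nat) : Int)) := by
            intro h
            have : k = k' := by exact_mod_cast h
            omega
          simp [hkey, hne]
        rw [hfx, List.append_nil]
      have h2 : ([k] : List Nat).flatMap
            (fun (k' : Nat) => (xs ++ [x]).filter (fun y => key y == ((k' : Int))))
          = ([k] : List Nat).flatMap
            (fun (k' : Nat) => xs.filter (fun y => key y == ((k' : Int)))) ++ [x] := by
        simp only [List.flatMap_cons, List.flatMap_nil, List.filter_append, List.append_nil]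
        rw [List.filter_cons_of_pos (by simp [hkey]), List.filter_nil]
      rw [h1, h2, List.append_assoc]
    rw [hright, hleft]
    simp

-- the rank key, in closed form
lemma key_eq (g : String) :
    PySem.Dict.getD ((PySem.List.enumerate pvGraphOrder).foldl
      (fun d p => PySem.Dict.insert d p.2 p.1) (PySem.Dict.empty)) g (pvGraphOrder.length : Int)
    = (if g == "skipgrams" then 0 else if g == "window" then 1 else if g == "constituency" then 2
       else if g == "syntactic" then 3 else if g == "tokens" then 4 else 5) := by
  have hd : ((PySem.List.enumerate pvGraphOrder).foldl
      (fun d p => PySem.Dict.insert d p.2 p.1) (PySem.Dict.empty))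
      = (⟨[("skipgrams", (0 : Int)), ("window", 1), ("constituency", 2),
           ("syntactic", 3), ("tokens", 4)]⟩ : PySem.Dict String Int) := rfl
  rw [hd]
  by_cases h1 : g = "skipgrams"
  · subst h1; rfl
  by_cases h2 : g = "window"
  · subst h2; rfl
  by_cases h3 : g = "constituency"
  · subst h3; rfl
  by_cases h4 : g = "syntactic"
  · subst h4; rfl
  by_cases h5 : g = "tokens"
  · subst h5; rfl
  have e1 : ("skipgrams" == g) = false := beq_eq_false_iff_ne.mpr (Ne.symm h1)
  have e2 : ("window" == g) = false := beq_eq_false_iff_ne.mpr (Ne.symm h2)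
  have e3 : ("constituency" == g) = false := beq_eq_false_iff_ne.mpr (Ne.symm h3)
  have e4 : ("syntactic" == g) = false := beq_eq_false_iff_ne.mpr (Ne.symm h4)
  have e5 : ("tokens" == g) = false := beq_eq_false_iff_ne.mpr (Ne.symm h5)
  have f1 : (g == "skipgrams") = false := beq_eq_false_iff_ne.mpr h1
  have f2 : (g == "window") = false := beq_eq_false_iff_ne.mpr h2
  have f3 : (g == "constituency") = false := beq_eq_false_iff_ne.mpr h3
  have f4 : (g == "syntactic") = false := beq_eq_false_iff_ne.mpr h4
  have f5 : (g == "tokens") = false := beq_eq_false_iff_ne.mpr h5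
  simp [PySem.Dict.getD, PySem.Dict.get?, List.find?, pvGraphOrder,
    e1, e2, e3, e4, e5, f1, f2, f3, f4, f5]

lemma filter_beq_singleton (a : String) : ∀ (l : List String), l.Nodup →
    l.filter (fun x => x == a) = if a ∈ l then [a] else [] := by
  intro l
  induction l with
  | nil => simp
  | cons b t ih =>
    intro hnd
    have hnd' := (List.nodup_cons.mp hnd).2
    by_cases hb : b = a
    · subst hb
      have hnt : b ∉ t := (List.nodup_cons.mp hnd).1
      rw [List.filter_cons_of_pos (by simp), ih hnd']
      simp [hnt]
    · rw [List.filter_cons_of_neg (by simp [hb]), ih hnd']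
      simp [Ne.symm hb]

-- ===== VERDICT (by name: the statement is the Claim_ definition above) =====
set_option maxHeartbeats 1000000 in
theorem order_graphs_spec : Claim_equal_order_graphs := by
  intro graphs _
  unfold Spec_order_graphs
  rw [order_graphs_eq]
  simp only [order_graphs_alt]
  rw [dedup_eq_pvDedup]
  have hnd := pvDedup_nodup graphs
  rw [sorted_groups _ 6 (pvDedup graphs) ?hb]
  case hb =>
    intro x _
    rw [key_eq]
    split_ifs
    exacts [⟨0, by omega, rfl⟩, ⟨1, by omega, rfl⟩, ⟨2, by omega, rfl⟩,
            ⟨3, by omega, rfl⟩, ⟨4, by omega, rfl⟩, ⟨5, by omega, rfl⟩]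
  simp only [key_eq]
  rw [show List.range 6 = [0, 1, 2, 3, 4, 5] from rfl]
  simp only [List.flatMap_cons, List.flatMap_nil, List.append_nil,
    Nat.cast_zero, Nat.cast_one, Nat.cast_ofNat]
  have h0 : (pvDedup graphs).filter (fun x =>
        (if x == "skipgrams" then (0 : Int) else if x == "window" then 1
         else if x == "constituency" then 2 else if x == "syntactic" then 3
         else if x == "tokens" then 4 else 5) == (0 : Int))
      = if "skipgrams" ∈ graphs then ["skipgrams"] else [] := by
    rw [List.filter_congr (q := fun x => x == "skipgrams") ?_,
        filter_beq_singleton _ (pvDedup graphs) hnd]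
    · simp [pvDedup_mem]
    · intro x _
      by_cases e1 : x = "skipgrams" <;> by_cases e2 : x = "window" <;>
        by_cases e3 : x = "constituency" <;> by_cases e4 : x = "syntactic" <;>
        by_cases e5 : x = "tokens" <;> simp [e1, e2, e3, e4, e5]
  have h1 : (pvDedup graphs).filter (fun x =>
        (if x == "skipgrams" then (0 : Int) else if x == "window" then 1
         else if x == "constituency" then 2 else if x == "syntactic" then 3
         else if x == "tokens" then 4 else 5) == (1 : Int))
      = if "window" ∈ graphs then ["window"] else [] := by
    rw [List.filter_congr (q := fun x => x == "window") ?_,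
        filter_beq_singleton _ (pvDedup graphs) hnd]
    · simp [pvDedup_mem]
    · intro x _
      by_cases e1 : x = "skipgrams" <;> by_cases e2 : x = "window" <;>
        by_cases e3 : x = "constituency" <;> by_cases e4 : x = "syntactic" <;>
        by_cases e5 : x = "tokens" <;> simp [e1, e2, e3, e4, e5]
  have h2 : (pvDedup graphs).filter (fun x =>
        (if x == "skipgrams" then (0 : Int) else if x == "window" then 1
         else if x == "constituency" then 2 else if x == "syntactic" then 3
         else if x == "tokens" then 4 else 5) == (2 : Int))
      = if "constituency" ∈ graphs then ["constituency"] else [] := by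
    rw [List.filter_congr (q := fun x => x == "constituency") ?_,
        filter_beq_singleton _ (pvDedup graphs) hnd]
    · simp [pvDedup_mem]
    · intro x _
      by_cases e1 : x = "skipgrams" <;> by_cases e2 : x = "window" <;>
        by_cases e3 : x = "constituency" <;> by_cases e4 : x = "syntactic" <;>
        by_cases e5 : x = "tokens" <;> simp [e1, e2, e3, e4, e5]
  have h3 : (pvDedup graphs).filter (fun x =>
        (if x == "skipgrams" then (0 : Int) else if x == "window" then 1
         else if x == "constituency" then 2 else if x == "syntactic" then 3
         else if x == "tokens" then 4 else 5) == (3 : Int))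
      = if "syntactic" ∈ graphs then ["syntactic"] else [] := by
    rw [List.filter_congr (q := fun x => x == "syntactic") ?_,
        filter_beq_singleton _ (pvDedup graphs) hnd]
    · simp [pvDedup_mem]
    · intro x _
      by_cases e1 : x = "skipgrams" <;> by_cases e2 : x = "window" <;>
        by_cases e3 : x = "constituency" <;> by_cases e4 : x = "syntactic" <;>
        by_cases e5 : x = "tokens" <;> simp [e1, e2, e3, e4, e5]
  have h4 : (pvDedup graphs).filter (fun x =>
        (if x == "skipgrams" then (0 : Int) else if x == "window" then 1
         else if x == "constituency" then 2 else if x == "syntactic" then 3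
         else if x == "tokens" then 4 else 5) == (4 : Int))
      = if "tokens" ∈ graphs then ["tokens"] else [] := by
    rw [List.filter_congr (q := fun x => x == "tokens") ?_,
        filter_beq_singleton _ (pvDedup graphs) hnd]
    · simp [pvDedup_mem]
    · intro x _
      by_cases e1 : x = "skipgrams" <;> by_cases e2 : x = "window" <;>
        by_cases e3 : x = "constituency" <;> by_cases e4 : x = "syntactic" <;>
        by_cases e5 : x = "tokens" <;> simp [e1, e2, e3, e4, e5]
  have h5 : (pvDedup graphs).filter (fun x =>
        (if x == "skipgrams" then (0 : Int) else if x == "window" then 1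
         else if x == "constituency" then 2 else if x == "syntactic" then 3
         else if x == "tokens" then 4 else 5) == (5 : Int))
      = (pvDedup graphs).filter
          (fun g => !((pvGraphOrder.filter (fun c => graphs.contains c)).contains g)) := by
    apply List.filter_congr
    intro x hx
    have hxg : x ∈ graphs := (pvDedup_mem graphs x).mp hx
    by_cases e1 : x = "skipgrams" <;> by_cases e2 : x = "window" <;>
      by_cases e3 : x = "constituency" <;> by_cases e4 : x = "syntactic" <;>
      by_cases e5 : x = "tokens" <;>
      simp_all [pvGraphOrder]
  rw [h0, h1, h2, h3, h4, h5]
  by_cases c1 : "skipgrams" ∈ graphs <;> by_cases c2 : "window" ∈ graphs <;>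
    by_cases c3 : "constituency" ∈ graphs <;> by_cases c4 : "syntactic" ∈ graphs <;>
    by_cases c5 : "tokens" ∈ graphs <;>
    simp [pvGraphOrder, c1, c2, c3, c4, c5]
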